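-- pv_equiv track=rewrite | github.com/brenoarosa/advent_of_code_2021 | advent/puzzle_02.py | get_corrected_final_position
-- ===== SOURCE A (Python) =====
-- from typing import List, Tuple
--
-- def get_corrected_final_position(instructions: List[Tuple[str, int]]) -> Tuple[int, int]:
--     x = 0
--     y = 0
--     aim = 0
--
--     for cmd, value in instructions:
--         if cmd == "forward":
--             x += value
--             y += aim * value
--         elif cmd == "up":
--             aim -= value
--         elif cmd == "down":
--             aim += value
--         else:
--             raise Exception("Unexpect value")
--
--     return x, y
-- ===== SOURCE B (Python) =====
-- from typing import List, Tuple
-- from itertools import accumulate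
--
-- def get_corrected_final_position(instructions: List[Tuple[str, int]]) -> Tuple[int, int]:
--     for cmd, _ in instructions:
--         if cmd not in ("forward", "up", "down"):
--             raise Exception("Unexpect value")
--     # prefix pass: aim before each step (aim only changes on up/down)
--     aims = list(accumulate(
--         (v if c == "down" else -v if c == "up" else 0 for c, v in instructions),
--         initial=0))
--     x = sum(v for c, v in instructions if c == "forward")
--     y = sum(a * v for (c, v), a in zip(instructions, aims) if c == "forward")
--     return x, y
-- ===== Notes on version B (the rewrite author's own statement) =====
-- stated objective: alternative
-- what changed: Replaced the single stateful loop over (x, y, aim) by a prefix-sum decomposition: a validation pass, an itertools.accumulate prefix pass computing the running aim, and two separate aggregation passes summing forward values for x and aim*value over forward steps for y.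
import Mathlib
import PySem

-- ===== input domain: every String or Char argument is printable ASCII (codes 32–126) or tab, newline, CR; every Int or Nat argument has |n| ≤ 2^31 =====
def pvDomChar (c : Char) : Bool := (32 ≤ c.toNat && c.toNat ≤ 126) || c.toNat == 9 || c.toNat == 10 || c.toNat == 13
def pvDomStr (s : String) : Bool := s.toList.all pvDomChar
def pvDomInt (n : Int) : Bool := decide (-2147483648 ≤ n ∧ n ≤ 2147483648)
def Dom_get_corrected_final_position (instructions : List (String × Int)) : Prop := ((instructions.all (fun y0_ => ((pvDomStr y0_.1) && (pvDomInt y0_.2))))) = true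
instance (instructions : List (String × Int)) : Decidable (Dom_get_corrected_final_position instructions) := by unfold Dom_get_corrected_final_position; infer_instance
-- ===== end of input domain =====

-- ===== PORT A =====
-- Header: B replaces A's single stateful loop by a prefix-aim pass plus two aggregation passes (alternative decomposition, same cost).
-- Port of A. Python raises Exception("Unexpect value") on any other command; those inputs are excluded by Pre_ (the else branch keeps the state only to stay total).
def get_corrected_final_position (instructions : List (String × Int)) : Int × Int :=
  let st := instructions.foldl (fun (s : Int × Int × Int) p =>
    if p.1 = "forward" then (s.1 + p.2, s.2.1 + s.2.2 * p.2, s.2.2)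
    else if p.1 = "up" then (s.1, s.2.1, s.2.2 - p.2)
    else if p.1 = "down" then (s.1, s.2.1, s.2.2 + p.2)
    else (s.1, s.2.1, s.2.2)) (0, 0, 0)
  (st.1, st.2.1)

-- ===== PORT B =====
-- the per-step aim delta (the generator inside accumulate in Source B)
def pvAimDelta (p : String × Int) : Int :=
  if p.1 = "down" then p.2 else if p.1 = "up" then -p.2 else 0

-- Port of B (Source B). Source B's validation loop only raises (on commands excluded by Pre_) and
-- produces no value, so it contributes nothing here. accumulate(..., initial=0) = List.scanl.
def get_corrected_final_position_alt (instructions : List (String × Int)) : Int × Int :=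
  let aims := instructions.scanl (fun a p => a + pvAimDelta p) 0
  let x := ((instructions.filter (fun p => p.1 = "forward")).map (fun p => p.2)).sum
  let y := (((instructions.zip aims).filter (fun q => q.1.1 = "forward")).map (fun q => q.2 * q.1.2)).sum
  (x, y)

-- ===== PRECONDITION & SPEC =====
-- Pre_ excludes exactly the inputs containing a command other than forward/up/down, on which A raises Exception (B raises too).
def Pre_get_corrected_final_position (instructions : List (String × Int)) : Prop :=
  ∀ p ∈ instructions, p.1 = "forward" ∨ p.1 = "up" ∨ p.1 = "down"
instance (instructions : List (String × Int)) : Decidable (Pre_get_corrected_final_position instructions) := by unfold Pre_get_corrected_final_position; infer_instance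
def pvWitness_get_corrected_final_position : (List (String × Int)) := [("forward", 2), ("down", 3), ("forward", 1), ("up", 1)]
def Spec_get_corrected_final_position (instructions : List (String × Int)) (out : Int × Int) : Prop := out = get_corrected_final_position_alt instructions
instance (instructions : List (String × Int)) (out : Int × Int) : Decidable (Spec_get_corrected_final_position instructions out) := by unfold Spec_get_corrected_final_position; infer_instance

-- ===== CLAIM =====
def Claim_equal_get_corrected_final_position : Prop := ∀ (instructions : List (String × Int)), Dom_get_corrected_final_position instructions → Pre_get_corrected_final_position instructions → Spec_get_corrected_final_position instructions (get_corrected_final_position instructions)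

-- ===== LEMMAS AND PROOFS =====

-- generalized invariant: A's fold from (x, y, aim) equals B's three aggregates shifted by the start state
theorem pv_main (l : List (String × Int)) :
    ∀ (x y aim : Int), (∀ p ∈ l, p.1 = "forward" ∨ p.1 = "up" ∨ p.1 = "down") →
    l.foldl (fun (s : Int × Int × Int) p =>
      if p.1 = "forward" then (s.1 + p.2, s.2.1 + s.2.2 * p.2, s.2.2)
      else if p.1 = "up" then (s.1, s.2.1, s.2.2 - p.2)
      else if p.1 = "down" then (s.1, s.2.1, s.2.2 + p.2)
      else (s.1, s.2.1, s.2.2)) (x, y, aim) =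
    (x + ((l.filter (fun p => p.1 = "forward")).map (fun p => p.2)).sum,
     y + (((l.zip (l.scanl (fun a p => a + pvAimDelta p) aim)).filter (fun q => q.1.1 = "forward")).map (fun q => q.2 * q.1.2)).sum,
     aim + (l.map pvAimDelta).sum) := by
  induction l with
  | nil => intro x y aim _; simp
  | cons p t ih =>
    intro x y aim h
    have hp := h p (List.mem_cons_self ..)
    have ht : ∀ q ∈ t, q.1 = "forward" ∨ q.1 = "up" ∨ q.1 = "down" := fun q hq => h q (List.mem_cons_of_mem _ hq)
    rcases hp with hp | hp | hp <;>
      simp only [List.foldl_cons, List.scanl, List.filter_cons, List.map_cons,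
        List.sum_cons, hp, pvAimDelta, ih _ _ _ ht] <;>
      simp [hp] <;> ring_nf <;> try simp

-- ===== VERDICT =====
theorem get_corrected_final_position_spec : Claim_equal_get_corrected_final_position := by
  intro l _ hpre
  unfold Spec_get_corrected_final_position get_corrected_final_position get_corrected_final_position_alt
  simp [pv_main l 0 0 0 hpre]
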